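-- pv_equiv track=rewrite | github.com/tortagel/advent-of-code-2021 | day17.py | get_velocities
-- ===== SOURCE A (Python) =====
-- def move(x, y, vx, vy):
--     x += vx
--     y += vy
--     if vx > 0: vx -= 1
--     elif vx < 0: vx += 1
--     vy -= 1
--     return (x, y, vx, vy)
--
-- def check_velocity(vx, vy, max_x, max_y, target_area):
--     x = y = highest_y = 0
--     while (x, y) not in target_area and x <= max_x and y >= max_y:
--         x, y, vx, vy = move(x, y, vx, vy)
--         if y > highest_y:
--             highest_y = y
--     return (x, y) in target_area, highest_y
--
-- def get_velocities(x1, y1, x2, y2):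
--     target_area = {(x, y) for y in range(y1, y2+1) for x in range(x1, x2+1)}
--     velocities = set()
--     hights = []
--     for vx in range(1, x2+1):
--         for vy in range(y1, -y1):
--             ok, highest_y = check_velocity(vx, vy, x2, y1, target_area)
--             if ok:
--                 velocities.add((vx, vy))
--                 hights.append(highest_y)
--     return velocities, max(hights)
-- ===== SOURCE B (Python) =====
-- def get_velocities(x1, y1, x2, y2):
--     # per-axis step tables: for each vy the steps whose y-position is in [y1,y2],
--     # for each vx the steps whose x-position is in [x1,x2] (x freezes once vx reaches 0)
--     ytab = []
--     for vy in range(y1, -y1):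
--         ts = [0] if y1 <= 0 <= y2 else []
--         t, y, v = 0, 0, vy
--         while y >= y1:
--             t += 1
--             y += v
--             v -= 1
--             if y1 <= y <= y2:
--                 ts.append(t)
--         ytab.append((vy, ts))
--     xtab = []
--     for vx in range(1, x2 + 1):
--         ts = [0] if x1 <= 0 <= x2 else []
--         t, x, v = 0, 0, vx
--         while v > 0:
--             t += 1
--             x += v
--             v -= 1
--             if x1 <= x <= x2:
--                 ts.append(t)
--         xtab.append((vx, ts, t, x1 <= x <= x2))
--     velocities = set()
--     heights = []
--     for vx, xts, tf, fok in xtab: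
--         for vy, yts in ytab:
--             hits = [t for t in yts if t in xts or (fok and t >= tf)]
--             if hits:
--                 velocities.add((vx, vy))
--                 m = min(hits[0], vy) if vy > 0 else 0
--                 heights.append(m * vy - m * (m - 1) // 2)
--     return velocities, max(heights)
-- ===== Notes on version B (the rewrite author's own statement) =====
-- stated objective: faster
-- what changed: Instead of simulating the full (x,y) trajectory for every (vx,vy) pair against a prebuilt target-point set, B precomputes one step table per axis (for each vy the steps whose y-position lies in [y1,y2], for each vx the steps whose x-position lies in [x1,x2], with the x-freeze giving an unbounded tail of steps) and declares a pair a hit iff the tables share a step, recovering the max height from the first shared step in closed form.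
import Mathlib
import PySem

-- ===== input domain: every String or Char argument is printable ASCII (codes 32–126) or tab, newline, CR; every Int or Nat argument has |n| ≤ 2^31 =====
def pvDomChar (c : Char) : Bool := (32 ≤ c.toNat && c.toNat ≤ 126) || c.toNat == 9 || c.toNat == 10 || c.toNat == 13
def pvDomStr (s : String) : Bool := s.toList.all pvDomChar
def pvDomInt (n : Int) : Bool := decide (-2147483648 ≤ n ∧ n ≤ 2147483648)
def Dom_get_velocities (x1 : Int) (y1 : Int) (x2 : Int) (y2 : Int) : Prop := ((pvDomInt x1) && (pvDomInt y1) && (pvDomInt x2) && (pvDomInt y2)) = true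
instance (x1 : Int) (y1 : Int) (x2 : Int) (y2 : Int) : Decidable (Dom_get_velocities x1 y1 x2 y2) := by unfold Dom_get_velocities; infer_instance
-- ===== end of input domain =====

-- B replaces A's per-pair trajectory simulation by per-axis step tables (steps whose
-- y-position / x-position is in band) intersected per pair; measurably faster.
-- Both Pythons raise ValueError (max of empty list) outside Pre_; the ports return a
-- dummy second component there, which the claim does not cover.

-- ===== PORT A =====
def pyMove (x y vx vy : Int) : Int × Int × Int × Int :=
  let x := x + vx
  let y := y + vy
  let vx := if vx > 0 then vx - 1 else if vx < 0 then vx + 1 else vx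
  let vy := vy - 1
  (x, y, vx, vy)

-- the 'while' of check_velocity, with enough fuel for every |input| ≤ 2^31 (proved below)
def checkLoop (target : PySem.Set (Int × Int)) (maxx maxy : Int) :
    Nat → Int → Int → Int → Int → Int → Bool × Int
  | 0, x, y, _, _, h => (PySem.Set.contains target (x, y), h)
  | Nat.succ f, x, y, vx, vy, h =>
    if PySem.Set.contains target (x, y) = false ∧ x ≤ maxx ∧ y ≥ maxy then
      match pyMove x y vx vy with
      | (x', y', vx', vy') =>
        checkLoop target maxx maxy f x' y' vx' vy' (if y' > h then y' else h)
    else (PySem.Set.contains target (x, y), h)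

def check_velocity (vx vy maxx maxy : Int) (target : PySem.Set (Int × Int)) : Bool × Int :=
  checkLoop target maxx maxy (2 ^ 64) 0 0 vx vy 0

def get_velocities (x1 : Int) (y1 : Int) (x2 : Int) (y2 : Int) : (List (Int × Int)) × Int :=
  let target : PySem.Set (Int × Int) :=
    PySem.Set.ofList ((PySem.List.pyRange y1 (y2 + 1) 1).flatMap
      (fun y => (PySem.List.pyRange x1 (x2 + 1) 1).map (fun x => (x, y))))
  let res := (PySem.List.pyRange 1 (x2 + 1) 1).foldl (fun acc vx =>
      (PySem.List.pyRange y1 (-y1) 1).foldl (fun acc vy =>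
        let r := check_velocity vx vy x2 y1 target
        if r.1 then (PySem.Set.add acc.1 (vx, vy), acc.2 ++ [r.2]) else acc) acc)
    (PySem.Set.empty, ([] : List Int))
  match PySem.List.max? res.2 (fun h => h) with
  | some m => (res.1, m)
  | none => (res.1, 0)   -- Python raises ValueError here (outside Pre_)

-- ===== PORT B =====
-- the y-table 'while' loop: collect steps t with y1 ≤ y ≤ y2, until y < y1
def yStepsLoop (y1 y2 : Int) : Nat → Int → Int → Int → List Int → List Int
  | 0, _, _, _, ts => ts
  | Nat.succ f, t, y, v, ts =>
    if y ≥ y1 then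
      let t := t + 1
      let y := y + v
      let v := v - 1
      yStepsLoop y1 y2 f t y v (if y1 ≤ y ∧ y ≤ y2 then ts ++ [t] else ts)
    else ts

-- the x-table 'while' loop: collect steps t with x1 ≤ x ≤ x2, until v = 0; returns (t, x, ts)
def xStepsLoop (x1 x2 : Int) : Nat → Int → Int → Int → List Int → Int × Int × List Int
  | 0, t, x, _, ts => (t, x, ts)
  | Nat.succ f, t, x, v, ts =>
    if v > 0 then
      let t := t + 1
      let x := x + v
      let v := v - 1
      xStepsLoop x1 x2 f t x v (if x1 ≤ x ∧ x ≤ x2 then ts ++ [t] else ts)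
    else (t, x, ts)

def get_velocities_alt (x1 : Int) (y1 : Int) (x2 : Int) (y2 : Int) : (List (Int × Int)) × Int :=
  let ytab : List (Int × List Int) := (PySem.List.pyRange y1 (-y1) 1).foldl (fun acc vy =>
      let ts0 : List Int := if y1 ≤ 0 ∧ 0 ≤ y2 then [0] else []
      acc ++ [(vy, yStepsLoop y1 y2 (2 ^ 64) 0 0 vy ts0)]) []
  let xtab : List (Int × List Int × Int × Bool) :=
    (PySem.List.pyRange 1 (x2 + 1) 1).foldl (fun acc vx =>
      let ts0 : List Int := if x1 ≤ 0 ∧ 0 ≤ x2 then [0] else []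
      let r := xStepsLoop x1 x2 (2 ^ 64) 0 0 vx ts0
      acc ++ [(vx, r.2.2, r.1, decide (x1 ≤ r.2.1 ∧ r.2.1 ≤ x2))]) []
  let res := xtab.foldl (fun acc e =>
      ytab.foldl (fun acc e2 =>
        let hits := e2.2.filter (fun t => e.2.1.contains t || (e.2.2.2 && decide (t ≥ e.2.2.1)))
        match hits with
        | [] => acc
        | T :: _ =>
          let m := if e2.1 > 0 then min T e2.1 else 0
          (PySem.Set.add acc.1 (e.1, e2.1),
           acc.2 ++ [m * e2.1 - PySem.Int.floordiv (m * (m - 1)) 2])) acc)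
    ((PySem.Set.empty : PySem.Set (Int × Int)), ([] : List Int))
  match PySem.List.max? res.2 (fun h => h) with
  | some m => (res.1, m)
  | none => (res.1, 0)   -- Python raises ValueError here (outside Pre_)

-- ===== PRECONDITION & SPEC =====
-- Pre_ is exactly the set of inputs on which A returns: some velocity hits the target
-- (then (max(x1,1), y1) hits at step 1); otherwise max([]) raises ValueError in A and in B.
def Pre_get_velocities (x1 : Int) (y1 : Int) (x2 : Int) (y2 : Int) : Prop :=
  x1 ≤ x2 ∧ 1 ≤ x2 ∧ y1 ≤ y2 ∧ y1 < 0
instance (x1 : Int) (y1 : Int) (x2 : Int) (y2 : Int) : Decidable (Pre_get_velocities x1 y1 x2 y2) := by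
  unfold Pre_get_velocities; infer_instance

def pvWitness_get_velocities : Int × Int × Int × Int := (2, -4, 5, -2)

def Spec_get_velocities (x1 : Int) (y1 : Int) (x2 : Int) (y2 : Int) (out : (List (Int × Int)) × Int) : Prop := out = get_velocities_alt x1 y1 x2 y2
instance (x1 : Int) (y1 : Int) (x2 : Int) (y2 : Int) (out : (List (Int × Int)) × Int) : Decidable (Spec_get_velocities x1 y1 x2 y2 out) := by unfold Spec_get_velocities; infer_instance

-- ===== CLAIM (what is proved, stated in full; the proofs are below) =====
def Claim_equal_get_velocities : Prop := ∀ (x1 : Int) (y1 : Int) (x2 : Int) (y2 : Int), Dom_get_velocities x1 y1 x2 y2 → Pre_get_velocities x1 y1 x2 y2 → Spec_get_velocities x1 y1 x2 y2 (get_velocities x1 y1 x2 y2)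

-- ===== LEMMAS AND PROOFS =====

-- ---- trajectory closed descriptions (proof-only) ----
def Ypos (vy : Int) : Nat → Int
  | 0 => 0
  | t + 1 => Ypos vy t + (vy - t)

def Xpos (vx : Int) : Nat → Int
  | 0 => 0
  | t + 1 => Xpos vx t + max (vx - t) 0

def Hmax (vy : Int) : Nat → Int
  | 0 => 0
  | t + 1 => if Ypos vy (t + 1) > Hmax vy t then Ypos vy (t + 1) else Hmax vy t

def inYb (y1 y2 vy : Int) (t : Nat) : Bool := decide (y1 ≤ Ypos vy t) && decide (Ypos vy t ≤ y2)
def inXb (x1 x2 vx : Int) (t : Nat) : Bool := decide (x1 ≤ Xpos vx t) && decide (Xpos vx t ≤ x2)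
def hitb (x1 y1 x2 y2 vx vy : Int) (t : Nat) : Bool := inXb x1 x2 vx t && inYb y1 y2 vy t
def stopb (x1 y1 x2 y2 vx vy : Int) (t : Nat) : Bool :=
  hitb x1 y1 x2 y2 vx vy t || decide (x2 < Xpos vx t) || decide (Ypos vy t < y1)
def belowb (y1 vy : Int) (t : Nat) : Bool := decide (Ypos vy t < y1)

-- ---- Y monotonicity / shape ----
theorem Ypos_mono_up (vy : Int) {s t : Nat} (h : s ≤ t) (ht : (t : Int) ≤ vy) :
    Ypos vy s ≤ Ypos vy t := by
  induction t, h using Nat.le_induction with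
  | base => exact le_refl _
  | succ t hst ih =>
    have h1 : (t : Int) ≤ vy := by push_cast at ht ⊢; omega
    have := ih h1
    show _ ≤ Ypos vy t + (vy - t)
    push_cast at ht
    omega

theorem Ypos_mono_down (vy : Int) {s t : Nat} (h : s ≤ t) (hs : vy ≤ (s : Int)) :
    Ypos vy t ≤ Ypos vy s := by
  induction t, h using Nat.le_induction with
  | base => exact le_refl _
  | succ t hst ih =>
    have hts : vy ≤ (t : Int) := le_trans hs (by exact_mod_cast hst)
    have := ih
    show Ypos vy t + (vy - t) ≤ _
    omega

theorem Ypos_min_ends (vy : Int) {a t b : Nat} (hat : a ≤ t) (htb : t ≤ b) :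
    min (Ypos vy a) (Ypos vy b) ≤ Ypos vy t := by
  rcases le_or_gt (t : Int) vy with hc | hc
  · exact le_trans (min_le_left _ _) (Ypos_mono_up vy hat hc)
  · exact le_trans (min_le_right _ _) (Ypos_mono_down vy htb (le_of_lt hc))

theorem Ypos_le_mul (vy : Int) (t : Nat) : Ypos vy t ≤ (t : Int) * vy := by
  induction t with
  | zero => simp [Ypos]
  | succ t ih =>
    show Ypos vy t + (vy - t) ≤ _
    have : ((t : Int) + 1) * vy = t * vy + vy := by ring
    push_cast
    omega

theorem Ypos_desc (vy : Int) (j : Nat) :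
    Ypos vy (vy.toNat + 1 + j) ≤ Ypos vy (vy.toNat + 1) - j := by
  induction j with
  | zero => simp
  | succ j ih =>
    have hle : vy ≤ (vy.toNat : Int) := Int.self_le_toNat vy
    have : Ypos vy (vy.toNat + 1 + (j + 1)) =
        Ypos vy (vy.toNat + 1 + j) + (vy - (vy.toNat + 1 + j : Nat)) := rfl
    rw [this]
    push_cast
    push_cast at ih
    omega

theorem exists_below (y1 vy : Int) : ∃ t, belowb y1 vy t = true := by
  refine ⟨vy.toNat + 1 + (Ypos vy (vy.toNat + 1) - y1 + 1).toNat, ?_⟩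
  have h1 := Ypos_desc vy (Ypos vy (vy.toNat + 1) - y1 + 1).toNat
  have h2 : (Ypos vy (vy.toNat + 1) - y1 + 1) ≤ ((Ypos vy (vy.toNat + 1) - y1 + 1).toNat : Int) :=
    Int.self_le_toNat _
  simp only [belowb, decide_eq_true_eq]
  omega

-- ---- X monotonicity / freeze ----
theorem Xpos_mono (vx : Int) {s t : Nat} (h : s ≤ t) : Xpos vx s ≤ Xpos vx t := by
  induction t, h using Nat.le_induction with
  | base => exact le_refl _
  | succ t hst ih =>
    show _ ≤ Xpos vx t + max (vx - t) 0
    have := le_max_right (vx - (t : Int)) 0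
    omega

theorem Xpos_freeze (vx : Int) {t : Nat} (h : vx.toNat ≤ t) : Xpos vx t = Xpos vx vx.toNat := by
  induction t, h using Nat.le_induction with
  | base => rfl
  | succ t hst ih =>
    show Xpos vx t + max (vx - t) 0 = _
    have hle : vx ≤ (vx.toNat : Int) := Int.self_le_toNat vx
    have ht : vx - (t : Int) ≤ 0 := by
      have : (vx.toNat : Int) ≤ (t : Int) := by exact_mod_cast hst
      omega
    rw [max_eq_right ht, add_zero, ih]

-- ---- A-side: the target set and the simulation loop ----
theorem contains_target (x1 y1 x2 y2 a b : Int) :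
    PySem.Set.contains (PySem.Set.ofList ((PySem.List.pyRange y1 (y2 + 1) 1).flatMap
      (fun y => (PySem.List.pyRange x1 (x2 + 1) 1).map (fun x => (x, y))))) (a, b)
    = (decide (x1 ≤ a) && decide (a ≤ x2) && (decide (y1 ≤ b) && decide (b ≤ y2))) := by
  rw [Bool.eq_iff_iff, PySem.Set.contains_iff]
  simp only [PySem.Set.mem_ofList, List.mem_flatMap, List.mem_map,
    PySem.List.mem_pyRange_one, Prod.mk.injEq, Bool.and_eq_true, decide_eq_true_eq]
  constructor
  · rintro ⟨y, ⟨hy1, hy2⟩, x, ⟨hx1, hx2⟩, hxa, hyb⟩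
    subst hxa; subst hyb
    omega
  · rintro ⟨⟨h1, h2⟩, h3, h4⟩
    exact ⟨b, ⟨h3, by omega⟩, a, ⟨h1, by omega⟩, rfl, rfl⟩

theorem contains_eq_hitb (x1 y1 x2 y2 vx vy : Int) (t : Nat) :
    PySem.Set.contains (PySem.Set.ofList ((PySem.List.pyRange y1 (y2 + 1) 1).flatMap
      (fun y => (PySem.List.pyRange x1 (x2 + 1) 1).map (fun x => (x, y)))))
      (Xpos vx t, Ypos vy t) = hitb x1 y1 x2 y2 vx vy t := by
  rw [contains_target]; rfl

theorem step_vx (vx : Int) (t : Nat) :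
    (if max (vx - t) 0 > 0 then max (vx - t) 0 - 1
     else if max (vx - t) 0 < 0 then max (vx - t) 0 + 1 else max (vx - t) 0)
    = max (vx - ((t : Nat) + 1 : Nat)) 0 := by
  rcases max_cases (vx - (t : Int)) 0 with ⟨he, hc⟩ | ⟨he, hc⟩ <;>
    rcases max_cases (vx - ((t : Nat) + 1 : Nat) : Int) 0 with ⟨he2, hc2⟩ | ⟨he2, hc2⟩ <;>
      rw [he, he2] <;> push_cast at hc hc2 ⊢ <;> (try split_ifs) <;> omega

theorem checkLoop_eq (x1 y1 x2 y2 vx vy : Int)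
    (hstop : ∃ t, stopb x1 y1 x2 y2 vx vy t = true) :
    ∀ (f t : Nat), t ≤ Nat.find hstop → Nat.find hstop ≤ t + f →
    checkLoop (PySem.Set.ofList ((PySem.List.pyRange y1 (y2 + 1) 1).flatMap
        (fun y => (PySem.List.pyRange x1 (x2 + 1) 1).map (fun x => (x, y))))) x2 y1
        f (Xpos vx t) (Ypos vy t) (max (vx - t) 0) (vy - t) (Hmax vy t)
      = (hitb x1 y1 x2 y2 vx vy (Nat.find hstop), Hmax vy (Nat.find hstop)) := by
  intro f
  induction f with
  | zero =>
    intro t h1 h2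
    have ht : t = Nat.find hstop := by omega
    rw [ht, ← contains_eq_hitb x1 y1 x2 y2 vx vy (Nat.find hstop)]
    rfl
  | succ f ih =>
    intro t h1 h2
    rw [show checkLoop (PySem.Set.ofList ((PySem.List.pyRange y1 (y2 + 1) 1).flatMap
        (fun y => (PySem.List.pyRange x1 (x2 + 1) 1).map (fun x => (x, y))))) x2 y1
        (f + 1) (Xpos vx t) (Ypos vy t) (max (vx - t) 0) (vy - t) (Hmax vy t)
      = if PySem.Set.contains (PySem.Set.ofList ((PySem.List.pyRange y1 (y2 + 1) 1).flatMap
            (fun y => (PySem.List.pyRange x1 (x2 + 1) 1).map (fun x => (x, y)))))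
            (Xpos vx t, Ypos vy t) = false ∧ Xpos vx t ≤ x2 ∧ Ypos vy t ≥ y1 then
          checkLoop (PySem.Set.ofList ((PySem.List.pyRange y1 (y2 + 1) 1).flatMap
            (fun y => (PySem.List.pyRange x1 (x2 + 1) 1).map (fun x => (x, y))))) x2 y1 f
            (Xpos vx t + max (vx - t) 0) (Ypos vy t + (vy - t))
            (if max (vx - t) 0 > 0 then max (vx - t) 0 - 1
             else if max (vx - t) 0 < 0 then max (vx - t) 0 + 1 else max (vx - t) 0)
            ((vy - t) - 1)
            (if Ypos vy t + (vy - t) > Hmax vy t then Ypos vy t + (vy - t) else Hmax vy t)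
        else (PySem.Set.contains (PySem.Set.ofList ((PySem.List.pyRange y1 (y2 + 1) 1).flatMap
            (fun y => (PySem.List.pyRange x1 (x2 + 1) 1).map (fun x => (x, y)))))
            (Xpos vx t, Ypos vy t), Hmax vy t) from rfl]
    rcases eq_or_lt_of_le h1 with heq | hlt
    · -- at the first stop time: the while condition is false
      have hs := Nat.find_spec hstop
      rw [← heq] at hs
      simp only [stopb, Bool.or_eq_true, decide_eq_true_eq] at hs
      have hcond : ¬ (PySem.Set.contains (PySem.Set.ofList ((PySem.List.pyRange y1 (y2 + 1) 1).flatMap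
            (fun y => (PySem.List.pyRange x1 (x2 + 1) 1).map (fun x => (x, y)))))
            (Xpos vx t, Ypos vy t) = false ∧ Xpos vx t ≤ x2 ∧ Ypos vy t ≥ y1) := by
        rintro ⟨hc, hx, hy⟩
        rw [contains_eq_hitb] at hc
        rcases hs with (h | h) | h
        · simp [h] at hc
        · omega
        · omega
      rw [if_neg hcond, heq, contains_eq_hitb]
    · -- strictly before the first stop time: the while condition is true, step
      have hns := Nat.find_min hstop hlt
      rw [Bool.not_eq_true] at hns
      simp only [stopb, Bool.or_eq_false_iff, decide_eq_false_iff_not] at hns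
      obtain ⟨⟨hnh, hx⟩, hy⟩ := hns
      rw [if_pos ⟨by rw [contains_eq_hitb]; exact hnh, by omega, by omega⟩]
      rw [step_vx]
      have e1 : Xpos vx t + max (vx - t) 0 = Xpos vx (t + 1) := rfl
      have e2 : Ypos vy t + (vy - t) = Ypos vy (t + 1) := rfl
      have e3 : (vy - t) - 1 = vy - ((t : Nat) + 1 : Nat) := by push_cast; ring
      rw [e1, e2, e3]
      rw [show (if Ypos vy (t + 1) > Hmax vy t then Ypos vy (t + 1) else Hmax vy t)
          = Hmax vy (t + 1) from rfl]
      exact ih (t + 1) hlt (by omega)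

theorem check_velocity_eq (x1 y1 x2 y2 vx vy : Int) (hvx : 0 ≤ vx)
    (hstop : ∃ t, stopb x1 y1 x2 y2 vx vy t = true) (hfuel : Nat.find hstop ≤ 2 ^ 64) :
    check_velocity vx vy x2 y1 (PySem.Set.ofList ((PySem.List.pyRange y1 (y2 + 1) 1).flatMap
        (fun y => (PySem.List.pyRange x1 (x2 + 1) 1).map (fun x => (x, y)))))
      = (hitb x1 y1 x2 y2 vx vy (Nat.find hstop), Hmax vy (Nat.find hstop)) := by
  have h0 := checkLoop_eq x1 y1 x2 y2 vx vy hstop (2 ^ 64) 0 (Nat.zero_le _) (by omega)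
  simpa [check_velocity, Xpos, Ypos, Hmax, max_eq_left hvx] using h0

theorem exists_stop (x1 y1 x2 y2 vx vy : Int) : ∃ t, stopb x1 y1 x2 y2 vx vy t = true := by
  obtain ⟨t, ht⟩ := exists_below y1 vy
  exact ⟨t, by simp only [stopb, Bool.or_eq_true]; exact Or.inr (by simpa [belowb] using ht)⟩

-- Bool extraction helpers (applied at Nat.find instantiations without rewriting them)
theorem hitb_elim {x1 y1 x2 y2 vx vy : Int} {t : Nat} (h : hitb x1 y1 x2 y2 vx vy t = true) :
    x1 ≤ Xpos vx t ∧ Xpos vx t ≤ x2 ∧ y1 ≤ Ypos vy t ∧ Ypos vy t ≤ y2 := by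
  simp only [hitb, inXb, inYb, Bool.and_eq_true, decide_eq_true_eq] at h
  tauto

theorem stopb_elim {x1 y1 x2 y2 vx vy : Int} {t : Nat} (h : stopb x1 y1 x2 y2 vx vy t = true) :
    hitb x1 y1 x2 y2 vx vy t = true ∨ x2 < Xpos vx t ∨ Ypos vy t < y1 := by
  simp only [stopb, Bool.or_eq_true, decide_eq_true_eq] at h
  tauto

theorem belowb_elim {y1 vy : Int} {t : Nat} (h : belowb y1 vy t = true) : Ypos vy t < y1 :=
  of_decide_eq_true h

-- y never returns into the band after first dropping below it (the band's floor is below the start)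
theorem not_inY_beyond (y1 y2 vy : Int) (hy1 : y1 < 0)
    (hbel : ∃ t, belowb y1 vy t = true) {u : Nat} (hu : Nat.find hbel < u) :
    inYb y1 y2 vy u = false := by
  have hs : Ypos vy (Nat.find hbel) < y1 := belowb_elim (Nat.find_spec hbel)
  have hmin := Ypos_min_ends vy (Nat.zero_le (Nat.find hbel)) (le_of_lt hu)
  simp only [inYb, Bool.and_eq_false_iff, decide_eq_false_iff_not]
  left
  have h0 : Ypos vy 0 = 0 := rfl
  rw [h0] at hmin
  rcases le_or_gt (Ypos vy u) 0 with h | h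
  · rw [min_eq_right h] at hmin; omega
  · rw [min_eq_left (le_of_lt h)] at hmin; omega

theorem hit_le_below (x1 y1 x2 y2 vx vy : Int) (hy1 : y1 < 0)
    (hbel : ∃ t, belowb y1 vy t = true) {u : Nat}
    (hu : hitb x1 y1 x2 y2 vx vy u = true) : u ≤ Nat.find hbel := by
  by_contra h
  have hb := not_inY_beyond y1 y2 vy hy1 hbel (by omega : Nat.find hbel < u)
  simp only [hitb, Bool.and_eq_true] at hu
  rw [hu.2] at hb
  cases hb

-- when some step hits, the simulation stops exactly at the first hitting step
theorem find_stop_eq_find_hit (x1 y1 x2 y2 vx vy : Int) (hy1 : y1 < 0)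
    (hstop : ∃ t, stopb x1 y1 x2 y2 vx vy t = true)
    (hhit : ∃ t, hitb x1 y1 x2 y2 vx vy t = true) :
    Nat.find hstop = Nat.find hhit := by
  apply le_antisymm
  · exact Nat.find_min' hstop (by
      simp only [stopb, Bool.or_eq_true]
      exact Or.inl (Or.inl (Nat.find_spec hhit)))
  · by_contra h
    have hlt : Nat.find hstop < Nat.find hhit := by omega
    have hnh := Nat.find_min hhit hlt
    rw [Bool.not_eq_true] at hnh
    have hs := stopb_elim (Nat.find_spec hstop)
    obtain ⟨ha1, ha2, ha3, ha4⟩ := hitb_elim (Nat.find_spec hhit)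
    rcases hs with hh | hx | hy
    · rw [hnh] at hh; cases hh
    · -- x already beyond the band: x is non-decreasing, so the later hit is impossible
      have := Xpos_mono vx (le_of_lt hlt)
      omega
    · -- y already below the band floor: y can never be in the band later
      have hmin := Ypos_min_ends vy (Nat.zero_le (Nat.find hstop)) (le_of_lt hlt)
      have h0 : Ypos vy 0 = 0 := rfl
      rw [h0] at hmin
      rcases le_or_gt (Ypos vy (Nat.find hhit)) 0 with hle | hgt
      · rw [min_eq_right hle] at hmin; omega
      · rw [min_eq_left (le_of_lt hgt)] at hmin; omega

-- running maximum of the y-path = value at min(t, apex time)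
theorem Hmax_eq (vy : Int) (t : Nat) : Hmax vy t = Ypos vy (min t vy.toNat) := by
  induction t with
  | zero => simp [Hmax, show Ypos vy 0 = 0 from rfl]
  | succ t ih =>
    have hmaxd : Hmax vy (t + 1) = max (Hmax vy t) (Ypos vy (t + 1)) := by
      show (if _ > _ then _ else _) = _
      split_ifs with h <;> omega
    rw [hmaxd, ih]
    rcases lt_or_ge t vy.toNat with h | h
    · rw [min_eq_left (by omega), min_eq_left (by omega)]
      have hvy : 0 < vy := by
        by_contra h'
        have : vy.toNat = 0 := Int.toNat_eq_zero.mpr (le_of_not_gt h')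
        omega
      have hc : ((t : Nat) + 1 : Int) ≤ vy := by
        have := Int.toNat_of_nonneg (le_of_lt hvy)
        have h2 : ((t + 1 : Nat) : Int) ≤ (vy.toNat : Int) := by exact_mod_cast h
        push_cast at h2 ⊢
        omega
      exact max_eq_right (Ypos_mono_up vy (Nat.le_succ t) hc)
    · rw [min_eq_right h, min_eq_right (by omega)]
      exact max_eq_left (Ypos_mono_down vy (by omega : vy.toNat ≤ t + 1) (Int.self_le_toNat vy))

theorem Ypos_closed (vy : Int) (t : Nat) :
    Ypos vy t = t * vy - PySem.Int.floordiv ((t : Int) * ((t : Int) - 1)) 2 := by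
  induction t with
  | zero =>
    norm_num [show Ypos vy 0 = 0 from rfl, show PySem.Int.floordiv 0 2 = 0 from by decide]
  | succ t ih =>
    show Ypos vy t + (vy - t) = _
    rw [ih, PySem.Int.floordiv_eq_ediv_of_pos (by norm_num),
      PySem.Int.floordiv_eq_ediv_of_pos (by norm_num)]
    push_cast
    have h2 : ((t : Int) + 1) * ((t : Int) + 1 - 1) = (t : Int) * ((t : Int) - 1) + t * 2 := by ring
    rw [h2, Int.add_mul_ediv_right _ _ (by norm_num : (2 : Int) ≠ 0)]
    have h3 : ((t : Int) + 1) * vy = t * vy + vy := by ring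
    omega

-- ---- fuel bounds ----
theorem below_witness (y1 vy : Int) :
    belowb y1 vy (vy.toNat + 1 + (Ypos vy (vy.toNat + 1) - y1 + 1).toNat) = true := by
  have h1 := Ypos_desc vy (Ypos vy (vy.toNat + 1) - y1 + 1).toNat
  have h2 : (Ypos vy (vy.toNat + 1) - y1 + 1) ≤ ((Ypos vy (vy.toNat + 1) - y1 + 1).toNat : Int) :=
    Int.self_le_toNat _
  simp only [belowb, decide_eq_true_eq]
  omega

theorem t0_bound (y1 vy : Int) (hvy : vy ≤ 2 ^ 31) (hy1 : -2 ^ 31 ≤ y1) :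
    vy.toNat + 1 + (Ypos vy (vy.toNat + 1) - y1 + 1).toNat ≤ 2 ^ 64 := by
  have hm : vy.toNat ≤ 2 ^ 31 := by
    rcases le_or_gt vy 0 with h | h
    · have : vy.toNat = 0 := Int.toNat_eq_zero.mpr h
      omega
    · have := Int.toNat_of_nonneg (le_of_lt h)
      omega
  have hY : Ypos vy (vy.toNat + 1) ≤ ((vy.toNat : Int) + 1) * vy := by
    have := Ypos_le_mul vy (vy.toNat + 1)
    push_cast at this
    exact this
  have hb1 : ((vy.toNat : Int) + 1) * vy ≤ ((vy.toNat : Int) + 1) * 2 ^ 31 :=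
    mul_le_mul_of_nonneg_left hvy (by positivity)
  have hb2 : ((vy.toNat : Int) + 1) * 2 ^ 31 ≤ ((2 : Int) ^ 31 + 1) * 2 ^ 31 := by
    have hc : ((vy.toNat : Int) + 1) ≤ (2 : Int) ^ 31 + 1 := by exact_mod_cast by omega
    exact mul_le_mul_of_nonneg_right hc (by positivity)
  have hconst : ((2 : Int) ^ 31 + 1) * 2 ^ 31 = 4611686020574871552 := by norm_num
  have hj : (Ypos vy (vy.toNat + 1) - y1 + 1).toNat ≤ (4611686020574871552 + 2 ^ 31 + 1 : Int).toNat := by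
    apply Int.toNat_le_toNat
    omega
  have : ((4611686020574871552 + 2 ^ 31 + 1 : Int)).toNat = 4611686022722355201 := by decide
  omega

-- ---- B-side: the per-axis table loops ----
theorem yStepsLoop_eq (y1 y2 vy : Int) (hbel : ∃ t, belowb y1 vy t = true) :
    ∀ (f t : Nat) (ts : List Int), t ≤ Nat.find hbel → Nat.find hbel ≤ t + f →
    yStepsLoop y1 y2 f (t : Int) (Ypos vy t) (vy - t) ts
      = ts ++ ((List.range' (t + 1) (Nat.find hbel - t)).filter (inYb y1 y2 vy)).map
          (fun s : Nat => (s : Int)) := by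
  intro f
  induction f with
  | zero =>
    intro t ts h1 h2
    have ht : t = Nat.find hbel := by omega
    rw [ht]
    simp [yStepsLoop]
  | succ f ih =>
    intro t ts h1 h2
    rcases eq_or_lt_of_le h1 with heq | hlt
    · have hs : Ypos vy t < y1 := by rw [heq]; exact belowb_elim (Nat.find_spec hbel)
      rw [show yStepsLoop y1 y2 (f + 1) (t : Int) (Ypos vy t) (vy - t) ts
          = if Ypos vy t ≥ y1 then
              yStepsLoop y1 y2 f ((t : Int) + 1) (Ypos vy t + (vy - t)) ((vy - t) - 1)
                (if y1 ≤ Ypos vy t + (vy - t) ∧ Ypos vy t + (vy - t) ≤ y2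
                 then ts ++ [(t : Int) + 1] else ts)
            else ts from rfl]
      rw [if_neg (by omega), ← heq]
      simp
    · have hns : ¬ Ypos vy t < y1 := by
        have := Nat.find_min hbel hlt
        rw [Bool.not_eq_true] at this
        simpa [belowb] using this
      rw [show yStepsLoop y1 y2 (f + 1) (t : Int) (Ypos vy t) (vy - t) ts
          = if Ypos vy t ≥ y1 then
              yStepsLoop y1 y2 f ((t : Int) + 1) (Ypos vy t + (vy - t)) ((vy - t) - 1)
                (if y1 ≤ Ypos vy t + (vy - t) ∧ Ypos vy t + (vy - t) ≤ y2
                 then ts ++ [(t : Int) + 1] else ts)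
            else ts from rfl]
      rw [if_pos (by omega)]
      have e1 : (t : Int) + 1 = ((t + 1 : Nat) : Int) := by push_cast; ring
      have e2 : Ypos vy t + (vy - t) = Ypos vy (t + 1) := rfl
      have e3 : (vy - t) - 1 = vy - ((t + 1 : Nat) : Int) := by push_cast; ring
      rw [e1, e2, e3]
      have e4 : (if y1 ≤ Ypos vy (t + 1) ∧ Ypos vy (t + 1) ≤ y2
            then ts ++ [((t + 1 : Nat) : Int)] else ts)
          = ts ++ (if inYb y1 y2 vy (t + 1) = true then [((t + 1 : Nat) : Int)] else []) := by
        by_cases hin : y1 ≤ Ypos vy (t + 1) ∧ Ypos vy (t + 1) ≤ y2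
        · rw [if_pos hin, if_pos (by simp only [inYb, Bool.and_eq_true, decide_eq_true_eq]; exact hin)]
        · rw [if_neg hin, if_neg (by simp only [inYb, Bool.and_eq_true, decide_eq_true_eq]; exact hin), List.append_nil]
      rw [e4, ih (t + 1) _ hlt (by omega)]
      have e5 : Nat.find hbel - t = (Nat.find hbel - (t + 1)) + 1 := by omega
      rw [e5, List.range'_succ]
      simp only [List.filter_cons]
      by_cases hin : inYb y1 y2 vy (t + 1) = true
      · rw [hin]
        simp
      · rw [Bool.not_eq_true] at hin
        rw [hin]
        simp
  
theorem xStepsLoop_eq (x1 x2 vx : Int) (hvx : 1 ≤ vx) :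
    ∀ (f t : Nat) (ts : List Int), t ≤ vx.toNat → vx.toNat ≤ t + f →
    xStepsLoop x1 x2 f (t : Int) (Xpos vx t) (vx - t) ts
      = ((vx.toNat : Int), Xpos vx vx.toNat,
          ts ++ ((List.range' (t + 1) (vx.toNat - t)).filter (inXb x1 x2 vx)).map
            (fun s : Nat => (s : Int))) := by
  have hvx0 : ((vx.toNat : Int)) = vx := Int.toNat_of_nonneg (by omega)
  intro f
  induction f with
  | zero =>
    intro t ts h1 h2
    have ht : t = vx.toNat := by omega
    rw [ht]
    simp [xStepsLoop]
  | succ f ih =>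
    intro t ts h1 h2
    rw [show xStepsLoop x1 x2 (f + 1) (t : Int) (Xpos vx t) (vx - t) ts
        = if vx - t > 0 then
            xStepsLoop x1 x2 f ((t : Int) + 1) (Xpos vx t + (vx - t)) ((vx - t) - 1)
              (if x1 ≤ Xpos vx t + (vx - t) ∧ Xpos vx t + (vx - t) ≤ x2
               then ts ++ [(t : Int) + 1] else ts)
          else ((t : Int), Xpos vx t, ts) from rfl]
    rcases eq_or_lt_of_le h1 with heq | hlt
    · rw [if_neg (by rw [heq]; omega), heq, hvx0]
      simp
    · have htv : (t : Int) < vx := by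
        have : ((t : Nat) : Int) < ((vx.toNat : Nat) : Int) := by exact_mod_cast hlt
        omega
      rw [if_pos (by omega)]
      have e1 : (t : Int) + 1 = ((t + 1 : Nat) : Int) := by push_cast; ring
      have e2 : Xpos vx t + (vx - t) = Xpos vx (t + 1) := by
        show _ = Xpos vx t + max (vx - t) 0
        rw [max_eq_left (by omega)]
      have e3 : (vx - t) - 1 = vx - ((t + 1 : Nat) : Int) := by push_cast; ring
      rw [e1, e2, e3]
      have e4 : (if x1 ≤ Xpos vx (t + 1) ∧ Xpos vx (t + 1) ≤ x2
            then ts ++ [((t + 1 : Nat) : Int)] else ts)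
          = ts ++ (if inXb x1 x2 vx (t + 1) = true then [((t + 1 : Nat) : Int)] else []) := by
        by_cases hin : x1 ≤ Xpos vx (t + 1) ∧ Xpos vx (t + 1) ≤ x2
        · rw [if_pos hin, if_pos (by simp only [inXb, Bool.and_eq_true, decide_eq_true_eq]; exact hin)]
        · rw [if_neg hin, if_neg (by simp only [inXb, Bool.and_eq_true, decide_eq_true_eq]; exact hin), List.append_nil]
      rw [e4, ih (t + 1) _ hlt (by omega)]
      have e5 : vx.toNat - t = (vx.toNat - (t + 1)) + 1 := by omega
      rw [e5, List.range'_succ]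
      simp only [List.filter_cons]
      by_cases hin : inXb x1 x2 vx (t + 1) = true
      · rw [hin]
        simp
      · rw [Bool.not_eq_true] at hin
        rw [hin]
        simp

-- ---- the full tables, as filters of step ranges ----
theorem yts_eq (y1 y2 vy : Int) (hbel : ∃ t, belowb y1 vy t = true)
    (hfuel : Nat.find hbel ≤ 2 ^ 64) :
    yStepsLoop y1 y2 (2 ^ 64) 0 0 vy (if y1 ≤ 0 ∧ 0 ≤ y2 then [0] else [])
      = ((List.range (Nat.find hbel + 1)).filter (inYb y1 y2 vy)).map (fun s : Nat => (s : Int)) := by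
  have h0 := yStepsLoop_eq y1 y2 vy hbel (2 ^ 64) 0
    (if y1 ≤ 0 ∧ 0 ≤ y2 then [0] else []) (Nat.zero_le _) (by omega)
  rw [show ((0 : Nat) : Int) = 0 from rfl, show Ypos vy 0 = 0 from rfl, sub_zero] at h0
  rw [h0]
  have e0 : (if y1 ≤ 0 ∧ 0 ≤ y2 then [(0 : Int)] else [])
      = (if inYb y1 y2 vy 0 = true then [(0 : Int)] else []) := by
    by_cases hin : y1 ≤ 0 ∧ 0 ≤ y2
    · rw [if_pos hin, if_pos]
      simp only [inYb, Bool.and_eq_true, decide_eq_true_eq, show Ypos vy 0 = 0 from rfl]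
      exact hin
    · rw [if_neg hin, if_neg]
      simp only [inYb, Bool.and_eq_true, decide_eq_true_eq, show Ypos vy 0 = 0 from rfl]
      exact hin
  rw [e0]
  have e1 : List.range (Nat.find hbel + 1) = 0 :: List.range' 1 (Nat.find hbel) := by
    rw [List.range_eq_range']
    rfl
  rw [e1, List.filter_cons]
  by_cases hin : inYb y1 y2 vy 0 = true
  · rw [hin]
    simp
  · rw [Bool.not_eq_true] at hin
    rw [hin]
    simp

theorem xr_eq (x1 x2 vx : Int) (hvx : 1 ≤ vx) (hvx31 : vx ≤ 2 ^ 31) :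
    xStepsLoop x1 x2 (2 ^ 64) 0 0 vx (if x1 ≤ 0 ∧ 0 ≤ x2 then [0] else [])
      = (vx, Xpos vx vx.toNat,
          ((List.range (vx.toNat + 1)).filter (inXb x1 x2 vx)).map (fun s : Nat => (s : Int))) := by
  have hfuel : vx.toNat ≤ 2 ^ 64 := by
    have : vx.toNat ≤ (2 ^ 31 : Int).toNat := Int.toNat_le_toNat hvx31
    have h2 : ((2 ^ 31 : Int)).toNat = 2 ^ 31 := by decide
    omega
  have h0 := xStepsLoop_eq x1 x2 vx hvx (2 ^ 64) 0
    (if x1 ≤ 0 ∧ 0 ≤ x2 then [0] else []) (Nat.zero_le _) (by omega)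
  rw [show ((0 : Nat) : Int) = 0 from rfl, show Xpos vx 0 = 0 from rfl, sub_zero] at h0
  rw [h0, Int.toNat_of_nonneg (by omega : (0:Int) ≤ vx)]
  have e0 : (if x1 ≤ 0 ∧ 0 ≤ x2 then [(0 : Int)] else [])
      = (if inXb x1 x2 vx 0 = true then [(0 : Int)] else []) := by
    by_cases hin : x1 ≤ 0 ∧ 0 ≤ x2
    · rw [if_pos hin, if_pos]
      simp only [inXb, Bool.and_eq_true, decide_eq_true_eq, show Xpos vx 0 = 0 from rfl]
      exact hin
    · rw [if_neg hin, if_neg]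
      simp only [inXb, Bool.and_eq_true, decide_eq_true_eq, show Xpos vx 0 = 0 from rfl]
      exact hin
  rw [e0]
  have e1 : List.range (vx.toNat + 1) = 0 :: List.range' 1 vx.toNat := by
    rw [List.range_eq_range']
    rfl
  rw [e1, List.filter_cons]
  by_cases hin : inXb x1 x2 vx 0 = true
  · rw [hin]
    simp
  · rw [Bool.not_eq_true] at hin
    rw [hin]
    simp

theorem filter_map_cast (l : List Nat) (p : Int → Bool) :
    (l.map (fun s : Nat => (s : Int))).filter p = (l.filter (fun u => p ((u : Nat) : Int))).map (fun s : Nat => (s : Int)) := by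
  induction l with
  | nil => rfl
  | cons a l ih =>
    simp only [List.map_cons, List.filter_cons, ih]
    by_cases h : p ((a : Nat) : Int) = true
    · rw [h]
      simp
    · rw [Bool.not_eq_true] at h
      rw [h]
      simp

-- ---- the per-pair intersection of the two tables is exactly the hit filter ----
theorem hits_eq (x1 y1 x2 y2 vx vy : Int) (hvx : 1 ≤ vx)
    (hbel : ∃ t, belowb y1 vy t = true) :
    (((List.range (Nat.find hbel + 1)).filter (inYb y1 y2 vy)).map (fun s : Nat => (s : Int))).filter
        (fun t => (((List.range (vx.toNat + 1)).filter (inXb x1 x2 vx)).map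
              (fun s : Nat => (s : Int))).contains t
            || (decide (x1 ≤ Xpos vx vx.toNat ∧ Xpos vx vx.toNat ≤ x2) && decide (t ≥ vx)))
      = ((List.range (Nat.find hbel + 1)).filter (hitb x1 y1 x2 y2 vx vy)).map
          (fun s : Nat => (s : Int)) := by
  rw [filter_map_cast, List.filter_filter]
  congr 1
  apply List.filter_congr
  intro u _
  have hKey : ((((List.range (vx.toNat + 1)).filter (inXb x1 x2 vx)).map
          (fun s : Nat => (s : Int))).contains (u : Int)
        || (decide (x1 ≤ Xpos vx vx.toNat ∧ Xpos vx vx.toNat ≤ x2) && decide ((u : Int) ≥ vx)))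
      = inXb x1 x2 vx u := by
    rw [Bool.eq_iff_iff, Bool.or_eq_true, Bool.and_eq_true, List.contains_iff_mem,
      List.mem_map]
    constructor
    · rintro (⟨w, hw, hwe⟩ | ⟨hfr, hge⟩)
      · have hwu : w = u := by exact_mod_cast hwe
        subst hwu
        exact (List.mem_filter.mp hw).2
      · -- in the frozen tail: x stays at its final value
        have hge' : vx.toNat ≤ u := by
          rw [decide_eq_true_eq] at hge
          have := Int.toNat_of_nonneg (by omega : (0:Int) ≤ vx)
          omega
        rw [decide_eq_true_eq] at hfr
        simp only [inXb, Bool.and_eq_true, decide_eq_true_eq]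
        rw [Xpos_freeze vx hge']
        exact hfr
    · intro hin
      rcases le_or_gt u vx.toNat with hle | hgt
      · exact Or.inl ⟨u, List.mem_filter.mpr ⟨List.mem_range.mpr (by omega), hin⟩, rfl⟩
      · right
        have hfr : Xpos vx u = Xpos vx vx.toNat := Xpos_freeze vx (by omega)
        simp only [inXb, Bool.and_eq_true, decide_eq_true_eq] at hin
        rw [hfr] at hin
        refine ⟨by rw [decide_eq_true_eq]; exact hin, ?_⟩
        rw [decide_eq_true_eq]
        have := Int.toNat_of_nonneg (by omega : (0:Int) ≤ vx)
        have h2 : ((vx.toNat : Nat) : Int) ≤ (u : Int) := by exact_mod_cast le_of_lt hgt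
        omega
  rw [hKey]
  simp only [hitb]

-- head of a filtered range is the first satisfying index
theorem filter_range_head (p : Nat → Bool) (n : Nat) (hex : ∃ t, p t = true)
    (hfn : Nat.find hex < n) :
    ((List.range n).filter p).head? = some (Nat.find hex) := by
  have hsplit : List.range n = List.range' 0 (Nat.find hex) ++ List.range' (Nat.find hex) (n - Nat.find hex) := by
    rw [List.range_eq_range', show n = Nat.find hex + (n - Nat.find hex) by omega,
      ← List.range'_append]
    norm_num
  rw [hsplit, List.filter_append]
  have hnil : (List.range' 0 (Nat.find hex)).filter p = [] := by
    rw [List.filter_eq_nil_iff]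
    intro a ha
    have : a < Nat.find hex := by
      have := List.mem_range'_1.mp ha
      omega
    have := Nat.find_min hex this
    simp only [Bool.not_eq_true] at this
    simp [this]
  rw [hnil, List.nil_append]
  have e1 : n - Nat.find hex = (n - Nat.find hex - 1) + 1 := by omega
  rw [e1, List.range'_succ, List.filter_cons, Nat.find_spec hex]
  rfl

theorem filter_range_nil_iff (p : Nat → Bool) (n : Nat) :
    (List.range n).filter p = [] ↔ ∀ u, u < n → p u = false := by
  rw [List.filter_eq_nil_iff]
  constructor
  · intro h u hu
    have := h u (List.mem_range.mpr hu)
    simpa using this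
  · intro h u hu
    have := h u (List.mem_range.mp hu)
    simp [this]

-- the running maximum of the y-path equals B's closed-form peak expression
theorem height_eq (vy : Int) (T : Nat) :
    Hmax vy T = (if vy > 0 then min (T : Int) vy else 0) * vy
      - PySem.Int.floordiv ((if vy > 0 then min (T : Int) vy else 0) *
          ((if vy > 0 then min (T : Int) vy else 0) - 1)) 2 := by
  rw [Hmax_eq]
  by_cases h : vy > 0
  · rw [if_pos h]
    have hv : ((vy.toNat : Nat) : Int) = vy := Int.toNat_of_nonneg (by omega)
    have hmin : min (T : Int) vy = ((min T vy.toNat : Nat) : Int) := by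
      rw [Nat.cast_min, hv]
    rw [hmin, ← Ypos_closed]
  · rw [if_neg h]
    have h0 : vy.toNat = 0 := Int.toNat_eq_zero.mpr (by omega)
    rw [h0, Nat.min_zero]
    norm_num [show Ypos vy 0 = 0 from rfl, show PySem.Int.floordiv 0 2 = 0 from by decide]

-- ---- the per-pair equivalence: simulation result = table-intersection result ----
theorem pair_eq (x1 y1 x2 y2 vx vy : Int) (hy1 : y1 < 0) (hvx1 : 1 ≤ vx)
    (hvx31 : vx ≤ 2 ^ 31) (hvy31 : vy ≤ 2 ^ 31) (hy131 : -2 ^ 31 ≤ y1)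
    (acc : PySem.Set (Int × Int) × List Int) :
    (if (check_velocity vx vy x2 y1 (PySem.Set.ofList ((PySem.List.pyRange y1 (y2 + 1) 1).flatMap
          (fun y => (PySem.List.pyRange x1 (x2 + 1) 1).map (fun x => (x, y)))))).1
     then (PySem.Set.add acc.1 (vx, vy), acc.2 ++ [(check_velocity vx vy x2 y1
          (PySem.Set.ofList ((PySem.List.pyRange y1 (y2 + 1) 1).flatMap
          (fun y => (PySem.List.pyRange x1 (x2 + 1) 1).map (fun x => (x, y)))))).2])
     else acc)
    = (match (yStepsLoop y1 y2 (2 ^ 64) 0 0 vy (if y1 ≤ 0 ∧ 0 ≤ y2 then [0] else [])).filter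
        (fun t => (xStepsLoop x1 x2 (2 ^ 64) 0 0 vx (if x1 ≤ 0 ∧ 0 ≤ x2 then [0] else [])).2.2.contains t
          || (decide (x1 ≤ (xStepsLoop x1 x2 (2 ^ 64) 0 0 vx (if x1 ≤ 0 ∧ 0 ≤ x2 then [0] else [])).2.1
                ∧ (xStepsLoop x1 x2 (2 ^ 64) 0 0 vx (if x1 ≤ 0 ∧ 0 ≤ x2 then [0] else [])).2.1 ≤ x2)
              && decide (t ≥ (xStepsLoop x1 x2 (2 ^ 64) 0 0 vx (if x1 ≤ 0 ∧ 0 ≤ x2 then [0] else [])).1))) with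
      | [] => acc
      | T :: _ => (PySem.Set.add acc.1 (vx, vy),
          acc.2 ++ [(if vy > 0 then min T vy else 0) * vy -
            PySem.Int.floordiv ((if vy > 0 then min T vy else 0) *
              ((if vy > 0 then min T vy else 0) - 1)) 2])) := by
  have hbel : ∃ t, belowb y1 vy t = true := exists_below y1 vy
  have hstop : ∃ t, stopb x1 y1 x2 y2 vx vy t = true := exists_stop x1 y1 x2 y2 vx vy
  have ht0 := t0_bound y1 vy hvy31 hy131
  have hfbel : Nat.find hbel ≤ 2 ^ 64 :=
    le_trans (Nat.find_min' hbel (below_witness y1 vy)) ht0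
  have hfstop : Nat.find hstop ≤ 2 ^ 64 := by
    refine le_trans (Nat.find_min' hstop ?_) ht0
    simp only [stopb, Bool.or_eq_true]
    exact Or.inr (by simpa [belowb] using below_witness y1 vy)
  rw [xr_eq x1 x2 vx hvx1 hvx31, yts_eq y1 y2 vy hbel hfbel,
    check_velocity_eq x1 y1 x2 y2 vx vy (by omega) hstop hfstop]
  simp only []
  rw [hits_eq x1 y1 x2 y2 vx vy hvx1 hbel]
  by_cases hhit : ∃ t, hitb x1 y1 x2 y2 vx vy t = true
  · have hfeq := find_stop_eq_find_hit x1 y1 x2 y2 vx vy hy1 hstop hhit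
    have hth : hitb x1 y1 x2 y2 vx vy (Nat.find hstop) = true := by
      rw [hfeq]; exact Nat.find_spec hhit
    rw [hth, if_pos rfl]
    have hlt : Nat.find hhit < Nat.find hbel + 1 := by
      have := hit_le_below x1 y1 x2 y2 vx vy hy1 hbel (Nat.find_spec hhit)
      omega
    have hhead := filter_range_head (hitb x1 y1 x2 y2 vx vy) (Nat.find hbel + 1) hhit hlt
    rcases hfl : (List.range (Nat.find hbel + 1)).filter (hitb x1 y1 x2 y2 vx vy) with _ | ⟨T, rest⟩
    · rw [hfl] at hhead; cases hhead
    · rw [hfl] at hhead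
      have hT : T = Nat.find hhit := by
        simpa using hhead
      subst hT
      simp only [List.map_cons]
      rw [hfeq, height_eq]
  · -- no step hits: the simulation reports a miss and the intersection is empty
    have hmiss : hitb x1 y1 x2 y2 vx vy (Nat.find hstop) = false := by
      rw [Bool.eq_false_iff]
      intro hc
      exact hhit ⟨_, hc⟩
    rw [hmiss, if_neg (by simp)]
    have hnil : (List.range (Nat.find hbel + 1)).filter (hitb x1 y1 x2 y2 vx vy) = [] := by
      rw [filter_range_nil_iff]
      intro u _
      rw [Bool.eq_false_iff]
      intro hc
      exact hhit ⟨_, hc⟩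
    rw [hnil]
    rfl

-- ===== VERDICT (by name: the statement is the Claim_ definition above) =====
theorem get_velocities_spec : Claim_equal_get_velocities := by
  intro x1 y1 x2 y2 hdom hpre
  show get_velocities x1 y1 x2 y2 = get_velocities_alt x1 y1 x2 y2
  simp only [get_velocities, get_velocities_alt]
  rw [PySem.List.foldl_append_singleton_eq_map, PySem.List.foldl_append_singleton_eq_map,
    List.nil_append, List.nil_append, List.foldl_map]
  have key : ∀ (ra rb : PySem.Set (Int × Int) × List Int), ra = rb →
      (match PySem.List.max? ra.2 (fun h => h) with
        | some m => (ra.1, m)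
        | none => (ra.1, 0) : PySem.Set (Int × Int) × Int)
      = (match PySem.List.max? rb.2 (fun h => h) with
        | some m => (rb.1, m)
        | none => (rb.1, 0)) := by
    rintro ra rb rfl
    rfl
  apply key
  apply PySem.List.foldl_congr_mem
  intro acc vx hvxmem
  rw [List.foldl_map]
  apply PySem.List.foldl_congr_mem
  intro acc2 vy hvymem
  rw [PySem.List.mem_pyRange_one] at hvxmem hvymem
  unfold Dom_get_velocities at hdom
  simp only [Bool.and_eq_true, pvDomInt, decide_eq_true_eq] at hdom
  obtain ⟨⟨⟨hd1, hd2⟩, hd3⟩, hd4⟩ := hdom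
  obtain ⟨hx12, hx2, hy12, hy1⟩ := hpre
  exact pair_eq x1 y1 x2 y2 vx vy hy1 (by omega) (by omega) (by omega) (by omega) acc2
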